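-- pv_equiv track=rewrite | github.com/thomaseibner/snowflake-provisioning | sfvalidator.py | is_quoted_name
-- ===== SOURCE A (Python) =====
-- def is_quoted_name(name):
--     if '\"' not in name:
--         return False
--     num_quotes = name.count('"')
--     if (num_quotes % 2) != 0:
--         return False
--     if name[0] != '"':
--         return False
--     if name[-1] != '"':
--         return False
--     if num_quotes > 2:
--         double_quoted_quotes = int((num_quotes / 2) - 2)
--         if len(name) < 3 + double_quoted_quotes:
--             return False
--         if len(name) > 255 + double_quoted_quotes:
--             return False
--         # now we just need to make sure all quotes are grouped together
--         quotes = []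
--         for elmnt in range(1, len(name)-1): # avoid checking on first and last character
--             if name[elmnt] == '\"':
--                 quotes.append(elmnt)
--         for elmnt in range(0, double_quoted_quotes+1):
--             if quotes[(elmnt*2)+1] - quotes[elmnt*2] != 1:
--                 return False
--     else:
--         if len(name) < 3: # only the two quotes - can't be valid
--             return False
--         if len(name) > 255:
--             return False
--     return True
-- ===== SOURCE B (Python) =====
-- def is_quoted_name(name):
--     n = name.count('"')
--     if n == 0 or n % 2 != 0 or name[0] != '"' or name[-1] != '"':
--         return False
--     extra = n // 2 - 2 if n > 2 else 0
--     if not (3 + extra <= len(name) <= 255 + extra):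
--         return False
--     return '"' not in name[1:-1].replace('""', '')
-- ===== Notes on version B (the rewrite author's own statement) =====
-- stated objective: simpler
-- what changed: B replaces A's index-collecting loop over the string plus the pair-index arithmetic loop with a single check that deleting escaped quote pairs from the interior slice leaves no stray quote, and folds A's two separate length-bound branches into one bound computed from the quote count.
import Mathlib
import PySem

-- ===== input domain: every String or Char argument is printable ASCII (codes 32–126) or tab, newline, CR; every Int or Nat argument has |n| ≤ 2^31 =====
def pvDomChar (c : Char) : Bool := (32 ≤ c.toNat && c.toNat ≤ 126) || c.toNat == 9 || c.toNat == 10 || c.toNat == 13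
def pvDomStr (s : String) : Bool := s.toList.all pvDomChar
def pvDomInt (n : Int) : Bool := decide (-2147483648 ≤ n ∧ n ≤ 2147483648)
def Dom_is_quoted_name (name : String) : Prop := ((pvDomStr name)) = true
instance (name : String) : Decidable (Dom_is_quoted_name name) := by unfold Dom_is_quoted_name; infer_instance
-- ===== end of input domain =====

-- B replaces A's index-collecting loop and pair-index arithmetic by a single check that stripping
-- escaped quote pairs from the interior leaves no stray quote; objective: simpler.

-- ===== PORT A =====
-- name[0] / name[-1] are evaluated only after the '"'-membership guard, so the string is nonempty
-- there and Python never raises; the pyGetD defaults are unreachable.  int(num_quotes / 2 - 2) is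
-- ported as floor division: exact, since num_quotes is an even machine-size count.
def is_quoted_name (name : String) : Bool :=
  if !(PySem.Str.isIn "\"" name) then false
  else
    let num_quotes : Int := (PySem.Str.count name "\"" : Int)
    if PySem.Int.mod num_quotes 2 ≠ 0 then false
    else if PySem.List.pyGetD name.toList 0 ' ' ≠ '"' then false
    else if PySem.List.pyGetD name.toList (-1) ' ' ≠ '"' then false
    else if 2 < num_quotes then
      let dqq : Int := PySem.Int.floordiv num_quotes 2 - 2
      if (PySem.Str.len name : Int) < 3 + dqq then false
      else if 255 + dqq < (PySem.Str.len name : Int) then false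
      else
        let quotes : List Int :=
          (PySem.List.pyRange 1 ((PySem.Str.len name : Int) - 1) 1).foldl
            (fun q i => if PySem.List.pyGetD name.toList i ' ' = '"' then q ++ [i] else q) []
        (PySem.List.pyRange 0 (dqq + 1) 1).foldl
          (fun ok e =>
            ok && (PySem.List.pyGetD quotes (2 * e + 1) 0 - PySem.List.pyGetD quotes (2 * e) 0 == 1))
          true
    else
      if (PySem.Str.len name : Int) < 3 then false
      else if 255 < (PySem.Str.len name : Int) then false
      else true

-- ===== PORT B =====
def is_quoted_name_alt (name : String) : Bool :=
  let n : Nat := PySem.Str.count name "\""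
  if n == 0 || n % 2 != 0 || !(PySem.List.pyGetD name.toList 0 ' ' == '"')
      || !(PySem.List.pyGetD name.toList (-1) ' ' == '"') then false
  else
    let extra : Int := if 2 < n then PySem.Int.floordiv (n : Int) 2 - 2 else 0
    if !(3 + extra ≤ (PySem.Str.len name : Int) && (PySem.Str.len name : Int) ≤ 255 + extra) then
      false
    else
      !(PySem.Str.isIn "\"" (PySem.Str.replace (PySem.Str.slice name (some 1) (some (-1))) "\"\"" ""))

-- ===== PRECONDITION & SPEC =====
def Spec_is_quoted_name (name : String) (out : Bool) : Prop := out = is_quoted_name_alt name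
instance (name : String) (out : Bool) : Decidable (Spec_is_quoted_name name out) := by unfold Spec_is_quoted_name; infer_instance

-- ===== CLAIM (what is proved, stated in full; the proofs are below) =====
def Claim_equal_is_quoted_name : Prop := ∀ (name : String), Dom_is_quoted_name name → Spec_is_quoted_name name (is_quoted_name name)

-- ===== LEMMAS AND PROOFS =====

-- the interior of a valid name with escaped quote pairs removed (B's replace('""',''))
def pvStrip : List Char → List Char
  | [] => []
  | [c] => [c]
  | c :: d :: t => if c = '"' ∧ d = '"' then pvStrip t else c :: pvStrip (d :: t)

-- the (Int) positions of '"' in a char list, counting from offset k (A's `quotes` list)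
def pvQIdx : List Char → Int → List Int
  | [], _ => []
  | c :: t, k => if c = '"' then k :: pvQIdx t (k + 1) else pvQIdx t (k + 1)

-- A's pairing condition: consecutive quote positions come in adjacent pairs
def pvPairsOK : List Int → Bool
  | [] => true
  | [_] => true
  | a :: b :: t => (b - a == 1) && pvPairsOK t

theorem pvCountGo (l : List Char) : ∀ (fuel : Nat) (acc : Nat), l.length ≤ fuel →
    PySem.Chars.count.go ['"'] fuel l acc = acc + l.count '"' := by
  induction l with
  | nil => intro fuel acc h; cases fuel <;> simp [PySem.Chars.count.go]
  | cons c t ih =>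
    intro fuel acc h
    cases fuel with
    | zero => simp at h
    | succ f =>
      simp only [PySem.Chars.count.go, List.isPrefixOf, List.length_cons] at *
      by_cases hc : c = '"'
      · simp [hc, ih f (acc + 1) (by omega)]; omega
      · simp [Ne.symm hc, hc, ih f acc (by omega)]

theorem pvCount_singleton (l : List Char) :
    PySem.Chars.count l ['"'] = l.count '"' := by
  simp [PySem.Chars.count, pvCountGo l l.length 0 le_rfl]

theorem pvIsIn_singleton (l : List Char) :
    PySem.Chars.isIn ['"'] l = l.contains '"' := by
  by_cases h : '"' ∈ l
  · have h2 : PySem.Chars.isIn ['"'] l = true := by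
      rw [PySem.Chars.isIn_iff_infix]
      obtain ⟨pre, post, rfl⟩ := List.mem_iff_append.mp h
      exact ⟨pre, post, by simp⟩
    simp [h2, h]
  · have h2 : PySem.Chars.isIn ['"'] l = false := by
      rw [PySem.Chars.isIn_eq_false_iff]
      intro hinf
      obtain ⟨pre, post, hpp⟩ := hinf
      exact h (by rw [← hpp]; simp)
    simp [h2, h]

theorem pvReplaceGo (l : List Char) : ∀ (fuel : Nat) (acc : List Char), l.length ≤ fuel →
    PySem.Chars.replace.go ['"', '"'] [] fuel l acc = acc.reverse ++ pvStrip l := by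
  induction l using pvStrip.induct with
  | case1 => intro fuel acc h; cases fuel <;> simp [PySem.Chars.replace.go, pvStrip]
  | case2 c =>
    intro fuel acc h
    cases fuel with
    | zero => simp at h
    | succ f =>
      have hp : List.isPrefixOf ['"', '"'] [c] = false := by
        simp [List.isPrefixOf]
      rw [PySem.Chars.replace.go, hp]
      cases f <;> simp [PySem.Chars.replace.go, pvStrip]
  | case3 c d t hcd ih =>
    intro fuel acc h
    cases fuel with
    | zero => simp at h
    | succ f =>
      have hp : List.isPrefixOf ['"', '"'] (c :: d :: t) = true := by
        simp [List.isPrefixOf, hcd.1, hcd.2]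
      rw [PySem.Chars.replace.go, hp]
      simp only [List.length_cons] at h
      rw [if_pos rfl, show List.drop (['"', '"'].length) (c :: d :: t) = t from by simp,
        show ([] : List Char).reverse ++ acc = acc by simp, ih f acc (by omega)]
      simp [pvStrip, hcd]
  | case4 c d t hcd ih =>
    intro fuel acc h
    cases fuel with
    | zero => simp at h
    | succ f =>
      have hp : List.isPrefixOf ['"', '"'] (c :: d :: t) = false := by
        simp [List.isPrefixOf]
        intro h1 h2; exact hcd ⟨h1.symm, h2.symm⟩
      rw [PySem.Chars.replace.go, hp]
      simp only [List.length_cons] at h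
      rw [if_neg (by simp), ih f (c :: acc) (by simp; omega)]
      simp [pvStrip, hcd]

theorem pvReplace_strip (l : List Char) :
    PySem.Chars.replace l ['"', '"'] [] = pvStrip l := by
  simp [PySem.Chars.replace, pvReplaceGo l l.length [] le_rfl]

theorem pvMem_strip {x : Char} {l : List Char} (h : x ∈ pvStrip l) : x ∈ l := by
  induction l using pvStrip.induct with
  | case1 => simp [pvStrip] at h
  | case2 c => simpa [pvStrip] using h
  | case3 c d t hcd ih => simp only [pvStrip, if_pos hcd] at h; simp [ih h]
  | case4 c d t hcd ih =>
    simp only [pvStrip, if_neg hcd, List.mem_cons] at h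
    rcases h with h | h
    · simp [h]
    · simpa using Or.inr (ih h)

theorem pvQIdx_length (l : List Char) : ∀ (k : Int), (pvQIdx l k).length = l.count '"' := by
  induction l with
  | nil => simp [pvQIdx]
  | cons c t ih =>
    intro k
    by_cases hc : c = '"'
    · simp [pvQIdx, hc, ih]
    · simp [pvQIdx, hc, ih]

theorem pvQIdx_le {l : List Char} : ∀ {k x : Int}, x ∈ pvQIdx l k → k ≤ x := by
  induction l with
  | nil => intro k x h; simp [pvQIdx] at h
  | cons c t ih =>
    intro k x h
    by_cases hc : c = '"'
    · rw [pvQIdx, if_pos hc] at h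
      rcases List.mem_cons.mp h with rfl | h
      · exact le_refl x
      · exact le_trans (by omega) (ih h)
    · rw [pvQIdx, if_neg hc] at h
      exact le_trans (by omega) (ih h)

theorem pvPairs_strip (l : List Char) : ∀ (k : Int), Even (l.count '"') →
    pvPairsOK (pvQIdx l k) = !(pvStrip l).contains '"' := by
  induction l using pvStrip.induct with
  | case1 => intro k h; simp [pvQIdx, pvStrip, pvPairsOK]
  | case2 c =>
    intro k h
    have hc : c ≠ '"' := by
      intro rfl'; subst rfl'; simp at h
    simp [pvQIdx, pvStrip, pvPairsOK, hc, Ne.symm hc]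
  | case3 c d t hcd ih =>
    intro k h
    obtain ⟨rfl, rfl⟩ := hcd
    simp only [pvQIdx, if_true, pvStrip, pvPairsOK]
    simp only [List.count_cons] at h
    have he : Even (List.count '"' t) := by
      rcases h with ⟨n, hn⟩
      exact ⟨n - 1, by simp at hn ⊢; omega⟩
    rw [show k + 1 + 1 = k + 2 by ring, ih (k + 2) he]
    simp
  | case4 c d t hcd ih =>
    intro k h
    by_cases hc : c = '"'
    · subst hc
      have hd : d ≠ '"' := fun hd => hcd ⟨rfl, hd⟩
      have hodd : ¬ Even (t.count '"') := by
        simp only [List.count_cons, hd, beq_iff_eq, ite_false, ite_true,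
          beq_self_eq_true] at h
        intro he
        rcases he with ⟨n, hn⟩; rcases h with ⟨m, hm⟩
        rw [hn] at hm
        omega
      have hne : pvQIdx t (k + 2) ≠ [] := by
        intro hnil
        have := pvQIdx_length t (k + 2)
        rw [hnil] at this
        exact hodd (by simp [← this])
      rw [pvQIdx, if_pos rfl, pvQIdx, if_neg hd]
      rcases hq : pvQIdx t (k + 1 + 1) with _ | ⟨b, rest⟩
      · exact absurd (by rw [show k + 2 = k + 1 + 1 by ring, hq]) hne
      · have hb : k + 2 ≤ b := by
          have := pvQIdx_le (l := t) (k := k + 1 + 1) (x := b) (by rw [hq]; simp)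
          omega
        have : (b - k == 1) = false := by simp; omega
        rw [pvPairsOK, this, Bool.false_and]
        have : '"' ∈ pvStrip ('"' :: d :: t) := by
          rw [pvStrip, if_neg hcd]; simp
        simp [this]
    · have hq : pvQIdx (c :: d :: t) k = pvQIdx (d :: t) (k + 1) := by
        rw [pvQIdx, if_neg hc]
      rw [hq, pvStrip, if_neg hcd]
      rw [ih (k + 1) (by simpa [List.count_cons, hc] using h)]
      simp [Ne.symm hc]

theorem pvFoldl_and {α : Type} (f : α → Bool) (L : List α) (acc : Bool) :
    L.foldl (fun ok e => ok && f e) acc = (acc && L.all f) := by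
  induction L generalizing acc with
  | nil => simp
  | cons x t ih => simp [List.foldl_cons, ih, Bool.and_assoc]

theorem pvFold_pairs (K : Nat) : ∀ (qs : List Int), qs.length = 2 * K →
    (PySem.List.pyRange 0 (K : Int) 1).foldl
      (fun ok e =>
        ok && (PySem.List.pyGetD qs (2 * e + 1) 0 - PySem.List.pyGetD qs (2 * e) 0 == 1))
      true = pvPairsOK qs := by
  induction K with
  | zero =>
    intro qs h
    have hq : qs = [] := List.length_eq_zero_iff.mp (by omega)
    subst hq
    simp [pvPairsOK]
  | succ n ih =>
    intro qs h
    rcases qs with _ | ⟨a, qs⟩; · simp at h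
    rcases qs with _ | ⟨b, qs⟩; · simp at h; omega
    have hlen : qs.length = 2 * n := by simp at h; omega
    have hshift : ∀ (δ : Nat) (k : Nat),
        PySem.List.pyGetD (a :: b :: qs) (2 * ((k : Int) + 1) + δ) 0
          = PySem.List.pyGetD qs (2 * (k : Int) + δ) 0 := by
      intro δ k
      rw [show (2 * ((k:Int) + 1) + δ) = ((2 * k + 2 + δ : Nat) : Int) by push_cast; ring,
        show (2 * (k:Int) + δ) = ((2 * k + δ : Nat) : Int) by push_cast; ring,
        PySem.List.pyGetD_natCast, PySem.List.pyGetD_natCast]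
      simp [List.getD]
      rw [show 2 * k + 2 + δ = (2 * k + δ) + 2 by ring]
      simp [List.getElem?_cons_succ]
    have hc0 : (PySem.List.pyGetD (a :: b :: qs) (2 * (0:Int) + 1) 0
        - PySem.List.pyGetD (a :: b :: qs) (2 * (0:Int)) 0 == 1) = (b - a == 1) := by
      norm_num [PySem.List.pyGetD_zero_cons]
      rw [show (1 : Int) = ((1:Nat) : Int) by simp, PySem.List.pyGetD_natCast]
      simp
    -- expand LHS
    rw [PySem.List.pyRange_zero_nat, List.range_succ_eq_map, List.map_cons, List.foldl_cons,
      List.map_map, List.foldl_map]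
    have hcong : (List.range n).foldl
        (fun ok k => ok &&
          (PySem.List.pyGetD (a :: b :: qs) (2 * ((Nat.succ k : Nat) : Int) + 1) 0
            - PySem.List.pyGetD (a :: b :: qs) (2 * ((Nat.succ k : Nat) : Int)) 0 == 1))
        (true && (b - a == 1))
        = (List.range n).foldl
        (fun ok k => ok &&
          (PySem.List.pyGetD qs (2 * ((k : Nat) : Int) + 1) 0
            - PySem.List.pyGetD qs (2 * ((k : Nat) : Int)) 0 == 1))
        (true && (b - a == 1)) := by
      apply PySem.List.foldl_congr_mem
      intro acc k hk
      have h1 := hshift 1 k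
      have h0 := hshift 0 k
      push_cast at h1 h0 ⊢
      simp only [add_zero] at h0
      rw [h1, h0]
    simp only [Nat.cast_zero, Function.comp_def]
    rw [hc0, hcong,
      pvFoldl_and (fun k => (PySem.List.pyGetD qs (2 * ((k:Nat) : Int) + 1) 0
        - PySem.List.pyGetD qs (2 * ((k:Nat) : Int)) 0 == 1)),
      show pvPairsOK (a :: b :: qs) = ((b - a == 1) && pvPairsOK qs) from rfl,
      ← ih qs hlen, PySem.List.pyRange_zero_nat, List.foldl_map,
      pvFoldl_and (fun k => (PySem.List.pyGetD qs (2 * ((k:Nat) : Int) + 1) 0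
        - PySem.List.pyGetD qs (2 * ((k:Nat) : Int)) 0 == 1))]
    simp

theorem pvQuotes_eq (m : List Char) : ∀ (off : Int) (l : List Char),
    (∀ k : Nat, k < m.length → PySem.List.pyGetD l (off + k) ' ' = m[k]!) →
    (PySem.List.pyRange (off) (off + m.length) 1).foldl
      (fun q i => if PySem.List.pyGetD l i ' ' = '"' then q ++ [i] else q) []
      = pvQIdx m off := by
  induction m with
  | nil => intro off l h; simp [pvQIdx]
  | cons c t ih =>
    intro off l h
    rw [PySem.List.pyRange_one_cons (by have := Int.natCast_nonneg ((c :: t).length); simp only [List.length_cons] at *; omega), List.foldl_cons]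
    have h0 : PySem.List.pyGetD l off ' ' = c := by
      have := h 0 (by simp)
      simpa using this
    have ht : ∀ k : Nat, k < t.length → PySem.List.pyGetD l (off + 1 + k) ' ' = t[k]! := by
      intro k hk
      have := h (k + 1) (by simp; omega)
      rw [show ((k + 1 : Nat) : Int) = (k : Int) + 1 by push_cast; ring,
        show off + ((k:Int) + 1) = off + 1 + k by ring] at this
      simpa using this
    have htail := ih (off + 1) l ht
    rw [show off + ((c :: t).length : Int) = (off + 1) + t.length by simp; ring]
    by_cases hc : c = '"'
    · rw [if_pos (by rw [h0, hc])]
      rw [pvQIdx, if_pos hc]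
      -- fold with acc [off] = [off] ++ fold with acc []
      rw [PySem.List.foldl_append_ite_eq_filter, ← htail, PySem.List.foldl_append_ite_eq_filter]
      simp
    · rw [if_neg (by rw [h0]; exact hc), pvQIdx, if_neg hc]
      exact htail

theorem pvDecomp (l : List Char) (h2 : 2 ≤ l.length)
    (h0 : PySem.List.pyGetD l 0 ' ' = '"') (h1 : PySem.List.pyGetD l (-1) ' ' = '"') :
    l = '"' :: l.tail.dropLast ++ ['"'] := by
  rcases l with _ | ⟨a, rest⟩
  · simp at h2
  · have hne : rest ≠ [] := by intro h; subst h; simp at h2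
    have ha : a = '"' := by simpa [PySem.List.pyGetD_zero_cons] using h0
    subst ha
    have hgl := PySem.List.pyGetD_neg_one ('"' :: rest) ' ' (by simp)
    rw [hgl] at h1
    rw [List.getLast_cons hne] at h1
    have hrest : rest = rest.dropLast ++ [rest.getLast hne] :=
      (List.dropLast_append_getLast hne).symm
    simp only [List.tail_cons]
    nth_rewrite 1 [hrest]
    rw [h1]
    simp

theorem pvInterior (m : List Char) :
    PySem.List.slice ('"' :: m ++ ['"']) (some 1) (some (-1)) = m := by
  have hlen : ('"' :: m ++ ['"']).length = m.length + 2 := by simp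
  rw [show (1 : Int) = ((1 : Nat) : Int) by simp]
  simp only [PySem.List.slice, PySem.List.clampIdx_natCast, hlen]
  rw [show min (1:Nat) (m.length + 2) = 1 by omega,
    show (-((1:Nat):Int)) = (-1:Int) by simp, PySem.List.clampIdx_neg_one,
    show m.length + 2 - 1 - 1 = m.length by omega,
    show List.drop 1 ('"' :: m ++ ['"']) = m ++ ['"'] by simp,
    List.take_left]

-- ===== VERDICT (by name: the statement is the Claim_ definition above) =====
theorem is_quoted_name_spec : Claim_equal_is_quoted_name := by
  intro name _
  unfold Spec_is_quoted_name
  simp only [is_quoted_name, is_quoted_name_alt]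
  have hq1 : ("\"" : String).toList = ['"'] := by decide
  have hq2 : ("\"\"" : String).toList = ['"', '"'] := by decide
  have hq0 : ("" : String).toList = ([] : List Char) := by decide
  set l := name.toList with hl
  have hcnt : PySem.Str.count name "\"" = l.count '"' := by
    rw [PySem.Str.count_eq, hq1, pvCount_singleton]
  have hisin : PySem.Str.isIn "\"" name = l.contains '"' := by
    rw [PySem.Str.isIn_eq, hq1, pvIsIn_singleton]
  have hlen : PySem.Str.len name = l.length := by
    simp [PySem.Str.len_eq, hl]
  rw [hcnt, hisin, hlen]
  by_cases hmem : '"' ∈ l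
  case neg =>
    have h1 : l.contains '"' = false := by simpa using hmem
    have h2 : l.count '"' = 0 := List.count_eq_zero.mpr hmem
    rw [if_pos (by simp [hmem]), if_pos (by simp [h2])]
  case pos =>
  have hcont : l.contains '"' = true := by simpa using hmem
  have hpos : 0 < l.count '"' := List.count_pos_iff.mpr hmem
  rw [hcont]
  by_cases hpar : l.count '"' % 2 = 0
  case neg =>
    have hA : PySem.Int.mod ((l.count '"' : Nat) : Int) 2 ≠ 0 := by
      rw [show (2:Int) = ((2:Nat):Int) by simp, PySem.Int.mod_natCast]
      exact_mod_cast hpar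
    have hB : (l.count '"' % 2 != 0) = true := by simpa using hpar
    rw [if_neg (by simp), if_pos hA, if_pos (by simp [hB])]
  case pos =>
  have hA : ¬ (PySem.Int.mod ((l.count '"' : Nat) : Int) 2 ≠ 0) := by
    rw [show (2:Int) = ((2:Nat):Int) by simp, PySem.Int.mod_natCast]
    simp [hpar]
  have hB : (l.count '"' % 2 != 0) = false := by simpa using hpar
  by_cases hc0 : PySem.List.pyGetD l 0 ' ' = '"'
  case neg =>
    rw [if_neg (by simp), if_neg hA, if_pos hc0, if_pos (by simp [hc0])]
  case pos =>
  by_cases hcl : PySem.List.pyGetD l (-1) ' ' = '"'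
  case neg =>
    rw [if_neg (by simp), if_neg hA, if_neg (by simp [hc0]), if_pos hcl,
      if_pos (by simp [hcl, hc0])]
  case pos =>
  -- all guards passed on both sides
  have hg : (List.count '"' l == 0 || List.count '"' l % 2 != 0
      || !(PySem.List.pyGetD l 0 ' ' == '"') || !(PySem.List.pyGetD l (-1) ' ' == '"')) = false := by
    simp [hpos.ne', hB, hc0, hcl]
  rw [if_neg (by simp), if_neg hA, if_neg (by simp [hc0]), if_neg (by simp [hcl]),
    hg, if_neg (show ¬(false = true) by simp)]
  by_cases hgt : 2 < l.count '"'
  case neg =>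
    have h2 : l.count '"' = 2 := by omega
    rw [if_neg (show ¬((2:Int) < ((l.count '"' : Nat):Int)) from by exact_mod_cast hgt),
      if_neg (show ¬(2 < l.count '"') from hgt)]
    by_cases hb1 : (l.length : Int) < 3
    · rw [if_pos hb1, if_pos (by simp; omega)]
    by_cases hb2 : (255 : Int) < (l.length : Int)
    · rw [if_neg hb1, if_pos hb2, if_pos (by simp; omega)]
    rw [if_neg hb1, if_neg hb2, if_neg (by simp; omega)]
    have hdec : l = '"' :: l.tail.dropLast ++ ['"'] := pvDecomp l (by omega) hc0 hcl
    have hcm : List.count '"' l.tail.dropLast = 0 := by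
      have := congrArg (List.count '"') hdec
      simp at this
      omega
    have hslice : (PySem.Str.slice name (some 1) (some (-1))).toList = l.tail.dropLast := by
      rw [PySem.Str.toList_slice, PySem.Chars.slice_eq_listSlice]
      conv_lhs => rw [show name.toList = l from rfl, hdec]
      exact pvInterior _
    rw [PySem.Str.isIn_eq, hq1, PySem.Str.toList_replace, hslice, hq2, hq0,
      pvReplace_strip, pvIsIn_singleton]
    have hnotin : '"' ∉ pvStrip l.tail.dropLast := by
      intro hx
      have := pvMem_strip hx
      rw [← List.count_pos_iff] at this
      omega
    simp [hnotin]
  case pos =>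
  have hcnt4 : 4 ≤ l.count '"' := by omega
  have h22 : 2 * (l.count '"' / 2) = l.count '"' :=
    Nat.mul_div_cancel' (Nat.dvd_of_mod_eq_zero hpar)
  have hfd : PySem.Int.floordiv ((l.count '"' : Nat) : Int) 2 - 2
      = ((l.count '"' / 2 : Nat) : Int) - 2 := by
    rw [show (2:Int) = ((2:Nat):Int) by simp, PySem.Int.floordiv_natCast]
  rw [if_pos (show (2:Int) < ((l.count '"' : Nat):Int) from by exact_mod_cast hgt),
    if_pos (show 2 < l.count '"' from hgt), hfd]
  by_cases hb1 : (l.length : Int) < 3 + (((l.count '"' / 2 : Nat) : Int) - 2)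
  · rw [if_pos hb1, if_pos (by simp; omega)]
  by_cases hb2 : 255 + (((l.count '"' / 2 : Nat) : Int) - 2) < (l.length : Int)
  · rw [if_neg hb1, if_pos hb2, if_pos (by simp; omega)]
  rw [if_neg hb1, if_neg hb2, if_neg (by simp; omega)]
  -- decompose the string
  have hL3 : 3 ≤ l.length := by omega
  have hdec : l = '"' :: l.tail.dropLast ++ ['"'] := pvDecomp l (by omega) hc0 hcl
  have hLm : l.length = l.tail.dropLast.length + 2 := by
    conv_lhs => rw [hdec]
    simp
  have hcm : List.count '"' l.tail.dropLast = l.count '"' - 2 := by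
    have := congrArg (List.count '"') hdec
    simp at this
    omega
  -- B's value
  have hslice : (PySem.Str.slice name (some 1) (some (-1))).toList = l.tail.dropLast := by
    rw [PySem.Str.toList_slice, PySem.Chars.slice_eq_listSlice]
    conv_lhs => rw [show name.toList = l from rfl, hdec]
    exact pvInterior _
  rw [PySem.Str.isIn_eq, hq1, PySem.Str.toList_replace, hslice, hq2, hq0,
    pvReplace_strip, pvIsIn_singleton]
  -- A's quotes list is the list of interior quote positions
  have hidx : ∀ k : Nat, k < l.tail.dropLast.length →
      PySem.List.pyGetD l (1 + (k : Int)) ' ' = l.tail.dropLast[k]! := by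
    intro k hk
    conv_lhs => rw [hdec]
    rw [show (1:Int) + (k:Int) = ((1 + k : Nat) : Int) by push_cast; ring,
      PySem.List.pyGetD_natCast, Nat.add_comm 1 k]
    rw [show ('"' :: l.tail.dropLast ++ ['"']).getD (k + 1) ' '
        = (l.tail.dropLast ++ ['"']).getD k ' ' from List.getD_cons_succ,
      List.getD_eq_getElem?_getD, List.getElem?_append_left hk,
      List.getElem!_eq_getElem?_getD]
    simp [List.getElem?_eq_getElem hk]
  rw [show ((l.length : Int) - 1) = 1 + ((l.tail.dropLast.length : Nat) : Int) by omega,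
    pvQuotes_eq l.tail.dropLast 1 l hidx]
  -- A's pairing loop
  rw [show (((l.count '"' / 2 : Nat) : Int) - 2 + 1) = ((l.count '"' / 2 - 1 : Nat) : Int) by
      push_cast [Nat.cast_sub (by omega : 1 ≤ l.count '"' / 2)]; ring,
    pvFold_pairs (l.count '"' / 2 - 1) _ (by rw [pvQIdx_length]; omega),
    pvPairs_strip l.tail.dropLast 1 ⟨l.count '"' / 2 - 1, by omega⟩]
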